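-- pv_equiv track=rewrite | github.com/AruJoy/algorithm-study | 백준/Gold/1005. ACM Craft/ACM Craft.py | build
-- ===== SOURCE A (Python) =====
-- def build(target, time_table, bf_list, dp):
--     load = 0
--     for before in bf_list[target]:
--         if before in dp:
--             load = max(load, dp[before])
--             continue
--         load = max(load, build(before, time_table, bf_list, dp))
--     dp[target] = load+ time_table[target]
--     return dp[target]
-- ===== SOURCE B (Python) =====
-- def build(target, time_table, bf_list, dp):
--     # Iterative postorder DFS with an explicit phase-tagged stack instead of recursion.
--     stack = [(target, False)]
--     while stack:
--         node, ready = stack.pop()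
--         if ready:
--             load = 0
--             for before in bf_list[node]:
--                 load = max(load, dp[before])
--             dp[node] = load + time_table[node]
--         elif node == target or node not in dp:
--             stack.append((node, True))
--             for before in reversed(bf_list[node]):
--                 if before not in dp:
--                     stack.append((before, False))
--     return dp[target]
-- ===== Notes on version B (the rewrite author's own statement) =====
-- stated objective: alternative
-- what changed: The recursive memoized DFS is replaced by an iterative postorder traversal over an explicit phase-tagged stack: a node is pushed unresolved, re-pushed as 'ready' above its unresolved prerequisites, and finalized (dp[node] = max of prerequisite dp values + its own time) only when popped ready, so no call stack is used.
import Mathlib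
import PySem

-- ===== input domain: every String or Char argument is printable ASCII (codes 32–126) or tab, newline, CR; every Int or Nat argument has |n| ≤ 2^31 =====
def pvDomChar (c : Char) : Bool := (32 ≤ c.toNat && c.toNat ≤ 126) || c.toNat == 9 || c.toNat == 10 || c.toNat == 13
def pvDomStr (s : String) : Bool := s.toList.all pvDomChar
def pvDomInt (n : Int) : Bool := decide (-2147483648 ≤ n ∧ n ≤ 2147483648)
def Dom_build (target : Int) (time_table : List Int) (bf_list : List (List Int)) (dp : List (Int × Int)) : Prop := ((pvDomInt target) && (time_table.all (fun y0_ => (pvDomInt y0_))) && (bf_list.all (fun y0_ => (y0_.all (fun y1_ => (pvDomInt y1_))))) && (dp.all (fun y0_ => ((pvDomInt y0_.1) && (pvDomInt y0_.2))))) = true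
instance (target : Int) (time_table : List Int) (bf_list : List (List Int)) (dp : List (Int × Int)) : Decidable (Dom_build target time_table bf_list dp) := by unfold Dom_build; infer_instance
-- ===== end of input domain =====

-- B replaces A's recursive memoized DFS by an explicit phase-tagged stack (iterative postorder);
-- both Pythons mutate the dp dict in the same way, the theorems below are about the return value.

-- ===== PORT A =====
-- A's recursion, transliterated with a fuel parameter as a pure totality guard (the fuel chosen in
-- `build` below never runs out on any input admitted by Pre_); the state pair is (load, dp).
mutual
def buildRecF (tt : List Int) (bf : List (List Int)) : Nat → Int → PySem.Dict Int Int → Int × PySem.Dict Int Int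
  | 0, _, dp => (0, dp)   -- fuel exhausted: unreachable under Pre_
  | f + 1, x, dp =>
    let r := buildFoldF tt bf f ((PySem.List.pyGet? bf x).getD []) 0 dp
    let v := r.1 + (PySem.List.pyGet? tt x).getD 0
    (v, r.2.insert x v)
  termination_by f _ _ => (f, 0, 0)

-- the `for before in bf_list[target]` loop of A
def buildFoldF (tt : List Int) (bf : List (List Int)) : Nat → List Int → Int → PySem.Dict Int Int → Int × PySem.Dict Int Int
  | _, [], load, dp => (load, dp)
  | f, b :: bs, load, dp =>
    if dp.contains b then
      buildFoldF tt bf f bs (max load (dp.getD b 0)) dp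
    else
      let r := buildRecF tt bf f b dp
      buildFoldF tt bf f bs (max load r.1) r.2
  termination_by f l _ _ => (f, 1, l.length)
end

def build (target : Int) (time_table : List Int) (bf_list : List (List Int)) (dp : List (Int × Int)) : Int :=
  (buildRecF time_table bf_list (bf_list.flatten.length + 2) target (PySem.Dict.ofList dp)).1

-- ===== PORT B =====
-- B's while-loop over the explicit stack; the fuel is only a totality guard (large enough on Pre_ inputs).
def runB (t : Int) (time_table : List Int) (bf_list : List (List Int)) : Nat → List (Int × Bool) → PySem.Dict Int Int → PySem.Dict Int Int
  | _, [], dp => dp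
  | 0, _ :: _, dp => dp
  | f + 1, (node, ready) :: rest, dp =>
    if ready then
      let load := ((PySem.List.pyGet? bf_list node).getD []).foldl (fun a b => max a (dp.getD b 0)) 0
      runB t time_table bf_list f rest (dp.insert node (load + (PySem.List.pyGet? time_table node).getD 0))
    else if node = t ∨ dp.contains node = false then
      runB t time_table bf_list f
        ((((PySem.List.pyGet? bf_list node).getD []).filter (fun b => !dp.contains b)).map (fun b => (b, false))
          ++ (node, true) :: rest) dp
    else
      runB t time_table bf_list f rest dp

def build_alt (target : Int) (time_table : List Int) (bf_list : List (List Int)) (dp : List (Int × Int)) : Int :=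
  let fuel := (bf_list.foldl (fun a l => max a l.length) 0 + 2) ^ (bf_list.flatten.length + 3)
  (runB target time_table bf_list fuel [(target, false)] (PySem.Dict.ofList dp)).getD target 0

-- ===== PRECONDITION & SPEC =====
-- the dependency-closure condition: every prerequisite transitively reachable from x through
-- nodes not already memoized in dp0 must index both tables, and no such path may be longer than
-- the fuel — a cycle yields arbitrarily long paths, so it fails for every fuel
def goodF (dp0 : PySem.Dict Int Int) (tt : List Int) (bf : List (List Int)) : Nat → Int → Bool
  | 0, _ => false
  | f + 1, x =>
    ((PySem.List.pyGet? bf x).getD []).all (fun j =>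
      dp0.contains j ||
        (decide (PySem.Raise.InRange bf.length j) &&
         decide (PySem.Raise.InRange tt.length j) &&
         goodF dp0 tt bf f j))

-- Pre_build holds exactly on the inputs where A returns: target indexes both tables, every
-- prerequisite transitively reachable from it through non-memoized nodes indexes both tables, and
-- that reachable part is acyclic (otherwise A recurses forever); on A-terminating inputs every such
-- path is simple, hence has at most bf_list.flatten.length edges, so the fuel excludes nothing.
-- Outside Pre_build A raises IndexError or never returns.
def Pre_build (target : Int) (time_table : List Int) (bf_list : List (List Int)) (dp : List (Int × Int)) : Prop :=
  PySem.Raise.InRange bf_list.length target ∧ PySem.Raise.InRange time_table.length target ∧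
  goodF (PySem.Dict.ofList dp) time_table bf_list (bf_list.flatten.length + 2) target = true
instance (target : Int) (time_table : List Int) (bf_list : List (List Int)) (dp : List (Int × Int)) : Decidable (Pre_build target time_table bf_list dp) := by unfold Pre_build; infer_instance

def pvWitness_build : Int × List Int × List (List Int) × (List (Int × Int)) :=
  (2, [3, 4, 5], [[], [0], [0, 1]], [])

def Spec_build (target : Int) (time_table : List Int) (bf_list : List (List Int)) (dp : List (Int × Int)) (out : Int) : Prop := out = build_alt target time_table bf_list dp
instance (target : Int) (time_table : List Int) (bf_list : List (List Int)) (dp : List (Int × Int)) (out : Int) : Decidable (Spec_build target time_table bf_list dp out) := by unfold Spec_build; infer_instance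

-- ===== CLAIM (what is proved, stated in full; the proofs are below) =====
def Claim_equal_build : Prop := ∀ (target : Int) (time_table : List Int) (bf_list : List (List Int)) (dp : List (Int × Int)), Dom_build target time_table bf_list dp → Pre_build target time_table bf_list dp → Spec_build target time_table bf_list dp (build target time_table bf_list dp)

-- ===== LEMMAS AND PROOFS =====

-- `d` is contained in `d'` (as a lookup table)
def DSub (d d' : PySem.Dict Int Int) : Prop := ∀ k v, d.get? k = some v → d'.get? k = some v

theorem DSub_refl (d : PySem.Dict Int Int) : DSub d d := fun _ _ h => h

theorem DSub_trans {d1 d2 d3 : PySem.Dict Int Int} (h1 : DSub d1 d2) (h2 : DSub d2 d3) : DSub d1 d3 :=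
  fun k v h => h2 k v (h1 k v h)

theorem contains_false_of_get?_none (d : PySem.Dict Int Int) (k : Int) (h : d.get? k = none) :
    d.contains k = false := by rw [PySem.Dict.contains_eq_isSome_get?, h]; rfl

theorem contains_true_of_get?_some (d : PySem.Dict Int Int) (k v : Int) (h : d.get? k = some v) :
    d.contains k = true := by rw [PySem.Dict.contains_eq_isSome_get?, h]; rfl

-- unfolding lemmas for the ports
theorem buildRecF_succ (tt : List Int) (bf : List (List Int)) (f : Nat) (x : Int) (dp : PySem.Dict Int Int) :
    buildRecF tt bf (f + 1) x dp =
      ((buildFoldF tt bf f ((PySem.List.pyGet? bf x).getD []) 0 dp).1 + (PySem.List.pyGet? tt x).getD 0,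
       (buildFoldF tt bf f ((PySem.List.pyGet? bf x).getD []) 0 dp).2.insert x
         ((buildFoldF tt bf f ((PySem.List.pyGet? bf x).getD []) 0 dp).1 + (PySem.List.pyGet? tt x).getD 0)) := by
  rw [buildRecF]

theorem buildFoldF_nil (tt : List Int) (bf : List (List Int)) (f : Nat) (load : Int) (dp : PySem.Dict Int Int) :
    buildFoldF tt bf f [] load dp = (load, dp) := by rw [buildFoldF]

theorem buildFoldF_cons_mem (tt : List Int) (bf : List (List Int)) (f : Nat) (b : Int) (bs : List Int)
    (load : Int) (dp : PySem.Dict Int Int) (v : Int) (h : dp.get? b = some v) :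
    buildFoldF tt bf f (b :: bs) load dp = buildFoldF tt bf f bs (max load v) dp := by
  rw [buildFoldF, if_pos (contains_true_of_get?_some dp b v h), PySem.Dict.getD_eq_get?_getD, h]
  rfl

theorem buildFoldF_cons_new (tt : List Int) (bf : List (List Int)) (f : Nat) (b : Int) (bs : List Int)
    (load : Int) (dp : PySem.Dict Int Int) (h : dp.get? b = none) :
    buildFoldF tt bf f (b :: bs) load dp =
      buildFoldF tt bf f bs (max load (buildRecF tt bf f b dp).1) (buildRecF tt bf f b dp).2 := by
  rw [buildFoldF]
  rw [if_neg (by simp [contains_false_of_get?_none dp b h])]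

-- the dict produced by the loop does not depend on the load accumulator
theorem buildFoldF_dict_load (tt : List Int) (bf : List (List Int)) (f : Nat) :
    ∀ (l : List Int) (load load' : Int) (dp : PySem.Dict Int Int),
      (buildFoldF tt bf f l load dp).2 = (buildFoldF tt bf f l load' dp).2 := by
  intro l
  induction l with
  | nil => intro load load' dp; rw [buildFoldF_nil, buildFoldF_nil]
  | cons b bs ih =>
    intro load load' dp
    cases hbd : dp.get? b with
    | some v => rw [buildFoldF_cons_mem tt bf f b bs load dp v hbd,
        buildFoldF_cons_mem tt bf f b bs load' dp v hbd]; exact ih _ _ _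
    | none => rw [buildFoldF_cons_new tt bf f b bs load dp hbd,
        buildFoldF_cons_new tt bf f b bs load' dp hbd]; exact ih _ _ _

-- A only adds fresh entries
theorem pres_main (tt : List Int) (bf : List (List Int)) :
    ∀ f : Nat,
      (∀ (x : Int) (dp : PySem.Dict Int Int), dp.get? x = none → DSub dp (buildRecF tt bf f x dp).2) ∧
      (∀ (l : List Int) (load : Int) (dp : PySem.Dict Int Int), DSub dp (buildFoldF tt bf f l load dp).2) := by
  intro f
  induction f with
  | zero =>
    have hrec : ∀ (x : Int) (dp : PySem.Dict Int Int), dp.get? x = none → DSub dp (buildRecF tt bf 0 x dp).2 := by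
      intro x dp _; rw [buildRecF]; exact DSub_refl dp
    refine ⟨hrec, ?_⟩
    intro l
    induction l with
    | nil => intro load dp; rw [buildFoldF_nil]; exact DSub_refl dp
    | cons b bs ihl =>
      intro load dp
      cases hbd : dp.get? b with
      | some v => rw [buildFoldF_cons_mem tt bf 0 b bs load dp v hbd]; exact ihl _ _
      | none =>
        rw [buildFoldF_cons_new tt bf 0 b bs load dp hbd]
        exact DSub_trans (hrec b dp hbd) (ihl _ _)
  | succ f ihf =>
    have hrec : ∀ (x : Int) (dp : PySem.Dict Int Int), dp.get? x = none → DSub dp (buildRecF tt bf (f + 1) x dp).2 := by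
      intro x dp hx
      rw [buildRecF_succ]
      intro k v hk
      have hne : k ≠ x := by intro he; rw [he, hx] at hk; cases hk
      rw [PySem.Dict.get?_insert, if_neg hne]
      exact ihf.2 _ _ _ k v hk
    refine ⟨hrec, ?_⟩
    intro l
    induction l with
    | nil => intro load dp; rw [buildFoldF_nil]; exact DSub_refl dp
    | cons b bs ihl =>
      intro load dp
      cases hbd : dp.get? b with
      | some v => rw [buildFoldF_cons_mem tt bf (f + 1) b bs load dp v hbd]; exact ihl _ _
      | none =>
        rw [buildFoldF_cons_new tt bf (f + 1) b bs load dp hbd]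
        exact DSub_trans (hrec b dp hbd) (ihl _ _)

theorem presFold (tt : List Int) (bf : List (List Int)) (f : Nat) (l : List Int) (load : Int)
    (dp : PySem.Dict Int Int) : DSub dp (buildFoldF tt bf f l load dp).2 :=
  (pres_main tt bf f).2 l load dp

theorem presRec (tt : List Int) (bf : List (List Int)) (f : Nat) (x : Int) (dp : PySem.Dict Int Int)
    (h : dp.get? x = none) : DSub dp (buildRecF tt bf f x dp).2 :=
  (pres_main tt bf f).1 x dp h

-- the recursion records its own result at its key (given fuel)
theorem recSelf (tt : List Int) (bf : List (List Int)) (f : Nat) (x : Int) (dp : PySem.Dict Int Int) :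
    (buildRecF tt bf (f + 1) x dp).2.get? x = some (buildRecF tt bf (f + 1) x dp).1 := by
  rw [buildRecF_succ]
  simp [PySem.Dict.get?_insert_self]

-- A's incrementally accumulated load equals the fold over the final dict
theorem load_eq (tt : List Int) (bf : List (List Int)) (f : Nat) :
    ∀ (l : List Int) (load : Int) (dp : PySem.Dict Int Int),
      (∀ b ∈ l, dp.get? b = none → 0 < f) →
      (buildFoldF tt bf f l load dp).1 =
        l.foldl (fun a b => max a ((buildFoldF tt bf f l load dp).2.getD b 0)) load := by
  intro l
  induction l with
  | nil => intro load dp _; rw [buildFoldF_nil]; rfl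
  | cons b bs ihl =>
    intro load dp hl
    cases hbd : dp.get? b with
    | some v =>
      rw [buildFoldF_cons_mem tt bf f b bs load dp v hbd]
      have hRv : (buildFoldF tt bf f bs (max load v) dp).2.getD b 0 = v := by
        rw [PySem.Dict.getD_eq_get?_getD, presFold tt bf f bs (max load v) dp b v hbd]; rfl
      rw [List.foldl_cons, hRv]
      exact ihl (max load v) dp (fun c hc => hl c (List.mem_cons_of_mem b hc))
    | none =>
      have hf : 0 < f := hl b List.mem_cons_self hbd
      obtain ⟨k, rfl⟩ : ∃ k, f = k + 1 := ⟨f - 1, by omega⟩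
      rw [buildFoldF_cons_new tt bf (k + 1) b bs load dp hbd]
      have hRv : (buildFoldF tt bf (k + 1) bs (max load (buildRecF tt bf (k + 1) b dp).1) (buildRecF tt bf (k + 1) b dp).2).2.getD b 0
          = (buildRecF tt bf (k + 1) b dp).1 := by
        rw [PySem.Dict.getD_eq_get?_getD,
          presFold tt bf (k + 1) bs _ _ b _ (recSelf tt bf k b dp)]; rfl
      rw [List.foldl_cons, hRv]
      refine ihl _ _ (fun c hc hc2 => hf)
  -- NOTE: the hypothesis only matters through hf

-- every list in bf is bounded by the foldl-max of lengths
theorem le_foldl_max (L : List (List Int)) : ∀ a : Nat, a ≤ L.foldl (fun a l => max a l.length) a := by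
  induction L with
  | nil => intro a; exact le_rfl
  | cons h t ih =>
    intro a
    exact le_trans (le_max_left a h.length) (ih (max a h.length))

theorem mem_le_foldl_max (L : List (List Int)) :
    ∀ (a : Nat) (l : List Int), l ∈ L → l.length ≤ L.foldl (fun a l => max a l.length) a := by
  induction L with
  | nil => intro a l hl; cases hl
  | cons h t ih =>
    intro a l hl
    rw [List.mem_cons] at hl
    rcases hl with hl | hl
    · subst hl
      exact le_trans (le_max_right a l.length) (le_foldl_max t (max a l.length))
    · exact ih (max a h.length) l hl

theorem row_len_le (bf : List (List Int)) (x : Int) :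
    ((PySem.List.pyGet? bf x).getD []).length ≤ bf.foldl (fun a l => max a l.length) 0 := by
  cases hrow : PySem.List.pyGet? bf x with
  | none => simp
  | some row =>
    simp only [Option.getD_some]
    exact mem_le_foldl_max bf 0 row (PySem.List.mem_of_pyGet?_eq_some bf hrow)

-- a path through non-memoized prerequisites (used to rule out re-expansion of the target)
def Chain (dp0 : PySem.Dict Int Int) (bf : List (List Int)) : Int → List Int → Int → Prop
  | y, [], z => y = z
  | y, b :: l, z => b ∈ (PySem.List.pyGet? bf y).getD [] ∧ dp0.contains b = false ∧ Chain dp0 bf b l z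

theorem chain_snoc (dp0 : PySem.Dict Int Int) (bf : List (List Int)) :
    ∀ (l : List Int) (y x b : Int), Chain dp0 bf y l x →
      b ∈ (PySem.List.pyGet? bf x).getD [] → dp0.contains b = false →
      Chain dp0 bf y (l ++ [b]) b := by
  intro l
  induction l with
  | nil =>
    intro y x b hc hmem hnc
    cases hc
    exact ⟨hmem, hnc, rfl⟩
  | cons c l ih =>
    intro y x b hc hmem hnc
    obtain ⟨h1, h2, h3⟩ := hc
    exact ⟨h1, h2, ih c x b h3 hmem hnc⟩

theorem goodF_step (dp0 : PySem.Dict Int Int) (tt : List Int) (bf : List (List Int)) (f : Nat)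
    (y b : Int) (hg : goodF dp0 tt bf (f + 1) y = true)
    (hmem : b ∈ (PySem.List.pyGet? bf y).getD []) (hnc : dp0.contains b = false) :
    goodF dp0 tt bf f b = true := by
  rw [goodF, List.all_eq_true] at hg
  have h := hg b hmem
  rw [hnc] at h
  simp only [Bool.false_or, Bool.and_eq_true] at h
  exact h.2

theorem chain_good (dp0 : PySem.Dict Int Int) (tt : List Int) (bf : List (List Int)) :
    ∀ (l : List Int) (y z : Int) (f : Nat), Chain dp0 bf y l z → goodF dp0 tt bf f y = true →
      l.length ≤ f ∧ goodF dp0 tt bf (f - l.length) z = true := by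
  intro l
  induction l with
  | nil =>
    intro y z f hc hg
    cases hc
    exact ⟨Nat.zero_le f, hg⟩
  | cons b l ih =>
    intro y z f hc hg
    obtain ⟨h1, h2, h3⟩ := hc
    obtain ⟨k, rfl⟩ : ∃ k, f = k + 1 := by
      cases f with
      | zero => rw [goodF] at hg; cases hg
      | succ k => exact ⟨k, rfl⟩
    have hb := goodF_step dp0 tt bf k y b hg h1 h2
    obtain ⟨hlen, hz⟩ := ih b z k h3 hb
    refine ⟨by simpa using Nat.succ_le_succ hlen, ?_⟩
    have : k + 1 - (b :: l).length = k - l.length := by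
      rw [List.length_cons]; omega
    rw [this]
    exact hz

-- a good target is on no non-memoized cycle
theorem no_cycle (dp0 : PySem.Dict Int Int) (tt : List Int) (bf : List (List Int)) (t : Int)
    (F : Nat) (hg : goodF dp0 tt bf F t = true) :
    ∀ l, l ≠ [] → ¬ Chain dp0 bf t l t := by
  intro l hne hc
  have key : ∀ f : Nat, goodF dp0 tt bf f t = true → False := by
    intro f
    induction f using Nat.strong_induction_on with
    | _ f IH =>
      intro hf
      obtain ⟨hlen, hz⟩ := chain_good dp0 tt bf l t t f hc hf
      have hlpos : 0 < l.length := List.length_pos_iff.mpr hne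
      exact IH (f - l.length) (by omega) hz
  exact key F hg

-- unfolding lemmas for B's loop
theorem runB_nil (t : Int) (tt : List Int) (bf : List (List Int)) (f : Nat) (dp : PySem.Dict Int Int) :
    runB t tt bf f [] dp = dp := by cases f <;> rfl

theorem runB_skip (t : Int) (tt : List Int) (bf : List (List Int)) (f : Nat) (node : Int)
    (rest : List (Int × Bool)) (dp : PySem.Dict Int Int) (v : Int)
    (h1 : node ≠ t) (h2 : dp.get? node = some v) :
    runB t tt bf (f + 1) ((node, false) :: rest) dp = runB t tt bf f rest dp := by
  rw [runB]
  rw [if_neg, if_neg]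
  · rintro (h | h)
    · exact h1 h
    · rw [contains_true_of_get?_some dp node v h2] at h; cases h
  · exact Bool.false_ne_true

theorem runB_expand (t : Int) (tt : List Int) (bf : List (List Int)) (f : Nat) (node : Int)
    (rest : List (Int × Bool)) (dp : PySem.Dict Int Int)
    (h : node = t ∨ dp.get? node = none) :
    runB t tt bf (f + 1) ((node, false) :: rest) dp =
      runB t tt bf f
        ((((PySem.List.pyGet? bf node).getD []).filter (fun b => !dp.contains b)).map (fun b => (b, false))
          ++ (node, true) :: rest) dp := by
  rw [runB]
  rw [if_neg Bool.false_ne_true, if_pos]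
  rcases h with h | h
  · exact Or.inl h
  · exact Or.inr (contains_false_of_get?_none dp node h)

theorem runB_ready (t : Int) (tt : List Int) (bf : List (List Int)) (f : Nat) (node : Int)
    (rest : List (Int × Bool)) (dp : PySem.Dict Int Int) :
    runB t tt bf (f + 1) ((node, true) :: rest) dp =
      runB t tt bf f rest
        (dp.insert node
          (((PySem.List.pyGet? bf node).getD []).foldl (fun a b => max a (dp.getD b 0)) 0
            + (PySem.List.pyGet? tt node).getD 0)) := by
  rw [runB]
  rw [if_pos rfl]

-- the machine run over the pushed (still unresolved) prerequisites simulates A's loop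
theorem simFold (t : Int) (tt : List Int) (bf : List (List Int)) (k : Nat)
    (dpG : PySem.Dict Int Int) (x : Int) (pl : List Int)
    (hpx : Chain dpG bf t pl x)
    (SIH : ∀ (y : Int) (ply : List Int), Chain dpG bf t ply y → goodF dpG tt bf k y = true →
      ∀ (dp : PySem.Dict Int Int) (rest : List (Int × Bool)), DSub dpG dp → (y = t ∨ dp.get? y = none) →
        ∃ f ≤ (bf.foldl (fun a l => max a l.length) 0 + 2) ^ (k + 1),
          ∀ g, runB t tt bf (f + g) ((y, false) :: rest) dp = runB t tt bf g rest (buildRecF tt bf k y dp).2) :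
    ∀ (l : List Int), (∀ b ∈ l, b ∈ (PySem.List.pyGet? bf x).getD []) →
      (∀ b ∈ l, dpG.get? b = none → goodF dpG tt bf k b = true) →
      ∀ (dp0 dp2 : PySem.Dict Int Int), DSub dpG dp0 → DSub dp0 dp2 → ∀ (rest2 : List (Int × Bool)),
        ∃ f ≤ l.length * (1 + (bf.foldl (fun a l => max a l.length) 0 + 2) ^ (k + 1)),
          ∀ g, runB t tt bf (f + g)
              ((l.filter (fun b => !dp0.contains b)).map (fun b => (b, false)) ++ rest2) dp2
            = runB t tt bf g rest2 (buildFoldF tt bf k l 0 dp2).2 := by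
  intro l
  induction l with
  | nil =>
    intro _ _ dp0 dp2 _ _ rest2
    refine ⟨0, Nat.zero_le _, fun g => ?_⟩
    rw [buildFoldF_nil]
    simp only [List.filter_nil, List.map_nil, List.nil_append, Nat.zero_add]
  | cons b bs ihl =>
    intro hrow hl dp0 dp2 hsubG hsub rest2
    have hrow' : ∀ c ∈ bs, c ∈ (PySem.List.pyGet? bf x).getD [] :=
      fun c hc => hrow c (List.mem_cons_of_mem b hc)
    have hl' : ∀ c ∈ bs, dpG.get? c = none → goodF dpG tt bf k c = true :=
      fun c hc => hl c (List.mem_cons_of_mem b hc)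
    cases hbd0 : dp0.get? b with
    | some v =>
      -- already resolved at push time: not pushed, A reads its value
      have hbd2 : dp2.get? b = some v := hsub b v hbd0
      obtain ⟨f1, hf1, hrun1⟩ := ihl hrow' hl' dp0 dp2 hsubG hsub rest2
      have hstep : (b :: bs).length * (1 + (bf.foldl (fun a l => max a l.length) 0 + 2) ^ (k + 1))
          = bs.length * (1 + (bf.foldl (fun a l => max a l.length) 0 + 2) ^ (k + 1))
            + (1 + (bf.foldl (fun a l => max a l.length) 0 + 2) ^ (k + 1)) := by
        rw [List.length_cons, Nat.succ_mul]
      refine ⟨f1, by omega, fun g => ?_⟩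
      have hfilter : (b :: bs).filter (fun b => !dp0.contains b) = bs.filter (fun b => !dp0.contains b) := by
        rw [List.filter_cons, contains_true_of_get?_some dp0 b v hbd0]
        simp
      rw [hfilter, hrun1 g, buildFoldF_cons_mem tt bf k b bs 0 dp2 v hbd2,
        buildFoldF_dict_load tt bf k bs (max 0 v) 0 dp2]
    | none =>
      have hbG : dpG.get? b = none := by
        cases hG : dpG.get? b with
        | none => rfl
        | some w => have := hsubG b w hG; rw [hbd0] at this; cases this
      have hbgood : goodF dpG tt bf k b = true := hl b List.mem_cons_self hbG
      have hchb : Chain dpG bf t (pl ++ [b]) b :=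
        chain_snoc dpG bf pl t x b hpx (hrow b List.mem_cons_self) (contains_false_of_get?_none dpG b hbG)
      have hbt : b ≠ t := by
        intro he
        exact no_cycle dpG tt bf t k (he ▸ hbgood) (pl ++ [b]) (by simp) (he ▸ hchb)
      have hfilter : (b :: bs).filter (fun b => !dp0.contains b) = b :: bs.filter (fun b => !dp0.contains b) := by
        rw [List.filter_cons, contains_false_of_get?_none dp0 b hbd0]
        simp
      cases hbd2 : dp2.get? b with
      | some v =>
        -- resolved meanwhile: the machine pops it and skips, A reads its value
        obtain ⟨f1, hf1, hrun1⟩ := ihl hrow' hl' dp0 dp2 hsubG hsub rest2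
        have hstep : (b :: bs).length * (1 + (bf.foldl (fun a l => max a l.length) 0 + 2) ^ (k + 1))
            = bs.length * (1 + (bf.foldl (fun a l => max a l.length) 0 + 2) ^ (k + 1))
              + (1 + (bf.foldl (fun a l => max a l.length) 0 + 2) ^ (k + 1)) := by
          rw [List.length_cons, Nat.succ_mul]
        refine ⟨f1 + 1, by omega, fun g => ?_⟩
        rw [hfilter]
        have harith : f1 + 1 + g = (f1 + g) + 1 := by omega
        rw [harith]
        simp only [List.map_cons, List.cons_append]
        rw [runB_skip t tt bf (f1 + g) b _ dp2 v hbt hbd2, hrun1 g,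
          buildFoldF_cons_mem tt bf k b bs 0 dp2 v hbd2,
          buildFoldF_dict_load tt bf k bs (max 0 v) 0 dp2]
      | none =>
        -- unresolved: the machine expands b (simulating A's recursive call), then continues
        obtain ⟨fb, hfb, hrunb⟩ := SIH b (pl ++ [b]) hchb hbgood dp2
          ((bs.filter (fun b => !dp0.contains b)).map (fun b => (b, false)) ++ rest2)
          (DSub_trans hsubG hsub) (Or.inr hbd2)
        have hsub3 : DSub dp0 (buildRecF tt bf k b dp2).2 :=
          DSub_trans hsub (presRec tt bf k b dp2 hbd2)
        obtain ⟨f1, hf1, hrun1⟩ := ihl hrow' hl' dp0 (buildRecF tt bf k b dp2).2 hsubG hsub3 rest2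
        have hstep : (b :: bs).length * (1 + (bf.foldl (fun a l => max a l.length) 0 + 2) ^ (k + 1))
            = bs.length * (1 + (bf.foldl (fun a l => max a l.length) 0 + 2) ^ (k + 1))
              + (1 + (bf.foldl (fun a l => max a l.length) 0 + 2) ^ (k + 1)) := by
          rw [List.length_cons, Nat.succ_mul]
        refine ⟨fb + f1, by omega, fun g => ?_⟩
        rw [hfilter]
        have harith : fb + f1 + g = fb + (f1 + g) := by omega
        rw [harith]
        simp only [List.map_cons, List.cons_append]
        rw [hrunb (f1 + g), hrun1 g,
          buildFoldF_cons_new tt bf k b bs 0 dp2 hbd2,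
          buildFoldF_dict_load tt bf k bs (max 0 (buildRecF tt bf k b dp2).1) 0 (buildRecF tt bf k b dp2).2]

-- the machine started on node x simulates A's recursion on x
theorem sim (t : Int) (tt : List Int) (bf : List (List Int)) (dpG : PySem.Dict Int Int) :
    ∀ (f : Nat) (x : Int) (pl : List Int), Chain dpG bf t pl x → goodF dpG tt bf f x = true →
      ∀ (dp : PySem.Dict Int Int) (rest : List (Int × Bool)), DSub dpG dp → (x = t ∨ dp.get? x = none) →
        ∃ fb ≤ (bf.foldl (fun a l => max a l.length) 0 + 2) ^ (f + 1),
          ∀ g, runB t tt bf (fb + g) ((x, false) :: rest) dp = runB t tt bf g rest (buildRecF tt bf f x dp).2 := by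
  intro f
  induction f with
  | zero => intro x pl _ hg; rw [goodF] at hg; cases hg
  | succ k IH =>
    intro x pl hpx hgood dp rest hsubG hcase
    have hlG : ∀ b ∈ (PySem.List.pyGet? bf x).getD [], dpG.get? b = none → goodF dpG tt bf k b = true := by
      intro b hb hnone
      exact goodF_step dpG tt bf k x b hgood hb (contains_false_of_get?_none dpG b hnone)
    have SIH : ∀ (y : Int) (ply : List Int), Chain dpG bf t ply y → goodF dpG tt bf k y = true →
        ∀ (dp' : PySem.Dict Int Int) (rest' : List (Int × Bool)), DSub dpG dp' → (y = t ∨ dp'.get? y = none) →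
          ∃ fb ≤ (bf.foldl (fun a l => max a l.length) 0 + 2) ^ (k + 1),
            ∀ g, runB t tt bf (fb + g) ((y, false) :: rest') dp' = runB t tt bf g rest' (buildRecF tt bf k y dp').2 :=
      fun y ply hcy hgy => IH y ply hcy hgy
    obtain ⟨f1, hf1, hrun1⟩ :=
      simFold t tt bf k dpG x pl hpx SIH ((PySem.List.pyGet? bf x).getD [])
        (fun b hb => hb) hlG dp dp hsubG (DSub_refl dp) ((x, true) :: rest)
    refine ⟨f1 + 2, ?_, fun g => ?_⟩
    · -- arithmetic: f1 + 2 is below the exponential budget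
      set D := bf.foldl (fun a l => max a l.length) 0 with hD
      have hlen : ((PySem.List.pyGet? bf x).getD []).length ≤ D := row_len_le bf x
      have hcard : ((PySem.List.pyGet? bf x).getD []).length * (1 + (D + 2) ^ (k + 1))
          ≤ D * (1 + (D + 2) ^ (k + 1)) := Nat.mul_le_mul_right _ hlen
      have hP : D + 2 ≤ (D + 2) ^ (k + 1) :=
        le_trans (le_of_eq (pow_one (D + 2)).symm) (Nat.pow_le_pow_right (by omega) (by omega))
      have hpow : (D + 2) ^ (k + 2) = (D + 2) ^ (k + 1) * (D + 2) := by rw [pow_succ]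
      have key : D * (1 + (D + 2) ^ (k + 1)) + 2 ≤ (D + 2) ^ (k + 1) * (D + 2) := by nlinarith
      calc f1 + 2 ≤ ((PySem.List.pyGet? bf x).getD []).length * (1 + (D + 2) ^ (k + 1)) + 2 :=
            Nat.add_le_add_right hf1 2
        _ ≤ D * (1 + (D + 2) ^ (k + 1)) + 2 := Nat.add_le_add_right hcard 2
        _ ≤ (D + 2) ^ (k + 1) * (D + 2) := key
        _ = (D + 2) ^ (k + 2) := hpow.symm
    · have hload : ∀ b ∈ (PySem.List.pyGet? bf x).getD [], dp.get? b = none → 0 < k := by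
        intro b hb hnone
        have hbG : dpG.get? b = none := by
          cases hG : dpG.get? b with
          | none => rfl
          | some w => have := hsubG b w hG; rw [hnone] at this; cases this
        have := hlG b hb hbG
        cases k with
        | zero => rw [goodF] at this; cases this
        | succ m => omega
      have e1 : f1 + 2 + g = f1 + (1 + g) + 1 := by omega
      rw [e1, runB_expand t tt bf _ x rest dp hcase, hrun1 (1 + g)]
      have e2 : 1 + g = g + 1 := by omega
      rw [e2, runB_ready, buildRecF_succ,
        ← load_eq tt bf k ((PySem.List.pyGet? bf x).getD []) 0 dp hload]

-- ===== VERDICT (by name: the statement is the Claim_ definition above) =====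
theorem build_spec : Claim_equal_build := by
  intro target tt bf dp _hDom hPre
  obtain ⟨hB, hT, hgood⟩ := hPre
  unfold Spec_build build build_alt
  obtain ⟨fb, hfb, hrun⟩ :=
    sim target tt bf (PySem.Dict.ofList dp) (bf.flatten.length + 2) target [] rfl hgood
      (PySem.Dict.ofList dp) [] (DSub_refl _) (Or.inl rfl)
  have he : bf.flatten.length + 2 + 1 = bf.flatten.length + 3 := by omega
  rw [he] at hfb
  have hsplit : (bf.foldl (fun a l => max a l.length) 0 + 2) ^ (bf.flatten.length + 3)
      = fb + ((bf.foldl (fun a l => max a l.length) 0 + 2) ^ (bf.flatten.length + 3) - fb) := by omega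
  simp only []
  rw [hsplit, hrun, runB_nil, buildRecF_succ]
  simp [PySem.Dict.getD_insert_self]
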